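-- pv_equiv track=rewrite | github.com/gogagubi/HackerRank-Python | problem_solving_07_greedy/MarcsCakewalk.py | marcsCakewalk
-- ===== SOURCE A (Python) =====
-- def marcsCakewalk(calorie):
--     calorie.sort(reverse=True)
--     power = 0
--     ans = 0
--
--     for i in calorie:
--         ans += pow(2, power) * i
--         power += 1
--
--     return ans
-- ===== SOURCE B (Python) =====
-- def marcsCakewalk(calorie):
--     counts = {}
--     for c in calorie:
--         counts[c] = counts.get(c, 0) + 1
--     ans = 0
--     p = 0
--     for v in sorted(counts, reverse=True):
--         k = counts[v]
--         ans += ((1 << (p + k)) - (1 << p)) * v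
--         p += k
--     return ans
-- ===== Notes on version B (the rewrite author's own statement) =====
-- stated objective: faster
-- what changed: Instead of sorting the whole list and computing pow(2, i) per element, B tallies occurrences in a dict and, looping over the sorted distinct values only, adds each value's whole block at once with the geometric-series closed form ((1 << (p+k)) - (1 << p)) * v, so big-int power construction happens once per distinct value instead of once per element; B also leaves the argument unmutated (A sorts it in place).
import Mathlib
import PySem

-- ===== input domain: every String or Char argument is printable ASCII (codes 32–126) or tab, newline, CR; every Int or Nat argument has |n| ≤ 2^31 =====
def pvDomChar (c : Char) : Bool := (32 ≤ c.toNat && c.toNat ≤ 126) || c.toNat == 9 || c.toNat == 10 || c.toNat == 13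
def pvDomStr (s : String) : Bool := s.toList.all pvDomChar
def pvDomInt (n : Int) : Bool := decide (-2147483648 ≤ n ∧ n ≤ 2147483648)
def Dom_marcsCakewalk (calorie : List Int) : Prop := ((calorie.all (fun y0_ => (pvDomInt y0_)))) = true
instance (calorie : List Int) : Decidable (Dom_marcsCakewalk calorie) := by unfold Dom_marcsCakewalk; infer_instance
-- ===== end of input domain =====

-- B groups equal calories with a count dict and adds each distinct value's geometric
-- block in one step over the sorted distinct values (objective: alternative).
-- A sorts its argument in place, B leaves it untouched: the equivalence proved here
-- is about the RETURN value only.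

-- ===== PORT A =====
-- A: calorie.sort(reverse=True); then ans += pow(2, power) * i with power += 1 each step.
def marcsCakewalk (calorie : List Int) : Int :=
  let s := PySem.List.sorted calorie (fun x => x) true
  (s.foldl (fun (st : Int × Nat) i => (st.1 + 2 ^ st.2 * i, st.2 + 1)) (0, 0)).1

-- ===== PORT B =====
-- B: counts[c] = counts.get(c, 0) + 1 over calorie; then for v in sorted(counts, reverse=True):
-- ans += ((1 << (p+k)) - (1 << p)) * v; p += k.  Counts are nonnegative, so the Python
-- shift exponent p+k is ported with .toNat (exact here: k = a count ≥ 0).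
def marcsCakewalk_alt (calorie : List Int) : Int :=
  let counts := calorie.foldl (fun (d : PySem.Dict Int Int) c => d.insert c (d.getD c 0 + 1)) PySem.Dict.empty
  let vs := PySem.List.sorted counts.keys (fun x => x) true
  (vs.foldl (fun (st : Int × Nat) v =>
      let k := (counts.getD v 0).toNat
      (st.1 + (2 ^ (st.2 + k) - 2 ^ st.2) * v, st.2 + k)) (0, 0)).1

-- ===== PRECONDITION & SPEC =====
def Spec_marcsCakewalk (calorie : List Int) (out : Int) : Prop := out = marcsCakewalk_alt calorie
instance (calorie : List Int) (out : Int) : Decidable (Spec_marcsCakewalk calorie out) := by unfold Spec_marcsCakewalk; infer_instance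

-- ===== CLAIM (what is proved, stated in full; the proofs are below) =====
def Claim_equal_marcsCakewalk : Prop := ∀ (calorie : List Int), Dom_marcsCakewalk calorie → Spec_marcsCakewalk calorie (marcsCakewalk calorie)

-- ===== LEMMAS AND PROOFS =====

-- A's step over a block of k copies of v starting at power p adds (2^(p+k) - 2^p) * v.
theorem foldA_replicate (k : Nat) (v ans : Int) (p : Nat) :
    (List.replicate k v).foldl (fun (st : Int × Nat) i => (st.1 + 2 ^ st.2 * i, st.2 + 1)) (ans, p)
      = (ans + ((2 : Int) ^ (p + k) - 2 ^ p) * v, p + k) := by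
  induction k generalizing ans p with
  | zero => simp
  | succ k ih =>
    rw [List.replicate_succ, List.foldl_cons, ih]
    have he : p + (k + 1) = p + 1 + k := by omega
    rw [Prod.mk.injEq]
    refine ⟨?_, by omega⟩
    rw [he]
    simp only [pow_add, pow_succ]
    ring

-- count of a in a flatMap of replicate-blocks over a Nodup value list
theorem count_flatMap_replicate (vs : List Int) (hnd : vs.Nodup) (cnt : Int → Nat) (a : Int) :
    ((vs.flatMap (fun v => List.replicate (cnt v) v)).count a)
      = if a ∈ vs then cnt a else 0 := by
  induction vs with
  | nil => simp
  | cons x xs ih =>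
    simp only [List.flatMap_cons, List.count_append, List.mem_cons]
    rw [ih hnd.of_cons]
    by_cases hax : a = x
    · subst hax
      have : a ∉ xs := (List.nodup_cons.mp hnd).1
      simp [this]
    · simp [hax, List.count_replicate, Ne.symm hax]

-- blocks over a strictly decreasing value list are Pairwise (· ≥ ·)
theorem pairwise_flatMap_replicate (vs : List Int) (cnt : Int → Nat)
    (h : vs.Pairwise (fun a b => b < a)) :
    (vs.flatMap (fun v => List.replicate (cnt v) v)).Pairwise (fun a b => b ≤ a) := by
  induction vs with
  | nil => simp
  | cons x xs ih =>
    simp only [List.flatMap_cons]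
    rw [List.pairwise_append]
    refine ⟨?_, ih (List.pairwise_cons.mp h).2, ?_⟩
    · exact List.pairwise_replicate.mpr (Or.inr le_rfl)
    · intro a ha b hb
      have hax : a = x := List.eq_of_mem_replicate ha
      have hbx : b ∈ xs := by
        rcases List.mem_flatMap.mp hb with ⟨v, hv, hbv⟩
        rw [List.eq_of_mem_replicate hbv]; exact hv
      subst hax
      exact le_of_lt ((List.pairwise_cons.mp h).1 b hbx)

-- the descending sort of l is exactly the replicate-blocks over its sorted distinct values
theorem sorted_desc_eq_blocks (l : List Int) :
    PySem.List.sorted l (fun x => x) true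
      = (PySem.List.sorted (PySem.Set.ofList l) (fun x => x) true).flatMap
          (fun v => List.replicate (l.count v) v) := by
  set vs := PySem.List.sorted (PySem.Set.ofList l) (fun x => x) true with hvs
  have hnd : vs.Nodup :=
    (PySem.List.sorted_perm (PySem.Set.ofList l) (fun x => x) true).nodup_iff.mpr
      (PySem.Set.nodup_ofList l)
  have hgt : vs.Pairwise (fun a b => b < a) := by
    have hge : vs.Pairwise (fun a b => b ≤ a) := PySem.List.sorted_pairwise_rev _ _
    have hne : vs.Pairwise (fun a b => a ≠ b) := hnd
    exact (hge.and hne).imp (fun h => lt_of_le_of_ne h.1 (Ne.symm h.2))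
  have hperm : (vs.flatMap (fun v => List.replicate (l.count v) v)).Perm l := by
    rw [List.perm_iff_count]
    intro a
    rw [count_flatMap_replicate vs hnd _ a]
    have hmem : a ∈ vs ↔ a ∈ l := by
      rw [hvs, PySem.List.mem_sorted, PySem.Set.mem_ofList]
    by_cases h : a ∈ l
    · simp [hmem.mpr h]
    · simp [h, hmem, List.count_eq_zero.mpr h]
  exact ((PySem.List.sorted_perm l (fun x => x) true).trans hperm.symm).eq_of_pairwise
    (fun a b _ _ h1 h2 => le_antisymm h2 h1)
    (PySem.List.sorted_pairwise_rev _ _)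
    (pairwise_flatMap_replicate vs _ hgt)

-- fold of A's step over the blocks equals B's fold over the distinct values
theorem foldA_blocks (vs : List Int) (cnt : Int → Nat) (st : Int × Nat) :
    ((vs.flatMap (fun v => List.replicate (cnt v) v)).foldl
        (fun (st : Int × Nat) i => (st.1 + 2 ^ st.2 * i, st.2 + 1)) st)
      = vs.foldl (fun (st : Int × Nat) v =>
          (st.1 + ((2 : Int) ^ (st.2 + cnt v) - 2 ^ st.2) * v, st.2 + cnt v)) st := by
  induction vs generalizing st with
  | nil => rfl
  | cons x xs ih =>
    simp only [List.flatMap_cons, List.foldl_append, List.foldl_cons]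
    rw [foldA_replicate, ih]

-- ===== VERDICT (by name: the statement is the Claim_ definition above) =====
theorem marcsCakewalk_spec : Claim_equal_marcsCakewalk := by
  intro calorie _
  unfold Spec_marcsCakewalk marcsCakewalk marcsCakewalk_alt
  simp only []
  rw [PySem.Dict.foldl_insert_getD_add_one_eq_counter, PySem.Dict.keys_counter]
  rw [sorted_desc_eq_blocks, foldA_blocks]
  congr 1
  apply PySem.List.foldl_congr_mem
  intro st v hv
  rw [PySem.Dict.getD_counter]
  simp
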